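-- pv_equiv track=rewrite | github.com/navig-run/core | navig/gateway/reply_chunking.py | _chunk_words
-- ===== SOURCE A (Python) =====
-- def _chunk_words(text: str, limit: int) -> list[str]:
--     """Greedy word-level chunking — guaranteed to stay within *limit*."""
--     chunks: list[str] = []
--     current_parts: list[str] = []
--     current_len = 0
--
--     for word in text.split():
--         # +1 for the space separator (except for first word in chunk)
--         needed = len(word) + (1 if current_parts else 0)
--         if current_len + needed > limit:
--             if current_parts:
--                 chunks.append(" ".join(current_parts))
--             # A single word longer than limit: hard-split it
--             if len(word) > limit:
--                 chunks.extend(_hard_split(word, limit))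
--                 current_parts = []
--                 current_len = 0
--             else:
--                 current_parts = [word]
--                 current_len = len(word)
--         else:
--             current_parts.append(word)
--             current_len += needed
--
--     if current_parts:
--         chunks.append(" ".join(current_parts))
--     return chunks
--
-- def _hard_split(text: str, limit: int) -> list[str]:
--     """Split *text* mechanically at *limit* boundaries (last resort)."""
--     return [text[i:i + limit] for i in range(0, len(text), limit)]
-- ===== SOURCE B (Python) =====
-- def _hard_split(text: str, limit: int) -> list[str]:
--     return [text[i:i + limit] for i in range(0, len(text), limit)]
--
--
-- def _chunk_words(text: str, limit: int) -> list[str]: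
--     """Boundary-finding chunker: for each chunk, scan forward to the maximal
--     run of words that fits, join it once, hard-splitting a lone over-long word."""
--     words = text.split()
--     chunks: list[str] = []
--     i = 0
--     n = len(words)
--     while i < n:
--         length = len(words[i])
--         j = i + 1
--         while j < n and length + 1 + len(words[j]) <= limit:
--             length += 1 + len(words[j])
--             j += 1
--         chunk = " ".join(words[i:j])
--         if len(chunk) > limit:
--             chunks.extend(_hard_split(chunk, limit))
--         else:
--             chunks.append(chunk)
--         i = j
--     return chunks
-- ===== Notes on version B (the rewrite author's own statement) =====
-- stated objective: alternative
-- what changed: Replaces A's accumulate-and-flush fold (running chunk parts + running length, flushing on overflow, eager in-loop hard-split) with a boundary-finding chunker: for each chunk it scans forward to the maximal run of words that fits the limit, joins that run once, and hard-splits the chunk only if it is a lone over-long word.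
import Mathlib
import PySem

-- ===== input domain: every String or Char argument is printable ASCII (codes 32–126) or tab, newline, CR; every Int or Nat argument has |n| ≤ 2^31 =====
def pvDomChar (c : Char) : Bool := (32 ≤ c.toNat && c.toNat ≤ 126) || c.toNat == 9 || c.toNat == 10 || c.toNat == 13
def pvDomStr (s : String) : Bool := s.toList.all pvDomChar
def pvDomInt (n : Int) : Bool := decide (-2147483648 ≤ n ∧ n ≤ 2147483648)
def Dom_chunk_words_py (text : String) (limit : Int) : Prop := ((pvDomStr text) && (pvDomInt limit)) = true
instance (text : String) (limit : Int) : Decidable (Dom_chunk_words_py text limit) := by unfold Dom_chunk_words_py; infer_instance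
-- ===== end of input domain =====

-- B replaces A's accumulate-and-flush fold by a boundary-finding chunker: it scans
-- forward to the maximal run of words that fits, joins it once, and hard-splits only a
-- lone over-long word (objective: alternative).


-- ===== PORT A =====
-- _hard_split: [text[i:i+limit] for i in range(0, len(text), limit)]
def pvHardSplit (text : String) (limit : Int) : List String :=
  (PySem.List.pyRange 0 (PySem.Str.len text) limit).map
    (fun i => PySem.Str.slice text (some i) (some (i + limit)))

-- A's loop body over the running state (chunks, current_parts, current_len)
def pvStepA (limit : Int) (st : List String × List String × Int) (word : String) :
    List String × List String × Int :=
  match st with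
  | (chunks, current_parts, current_len) =>
    let needed : Int := PySem.Str.len word + (if current_parts = [] then 0 else 1)
    if current_len + needed > limit then
      let chunks := if current_parts = [] then chunks
                    else chunks ++ [PySem.Str.join " " current_parts]
      if PySem.Str.len word > limit then
        (chunks ++ pvHardSplit word limit, [], 0)
      else
        (chunks, [word], PySem.Str.len word)
    else
      (chunks, current_parts ++ [word], current_len + needed)

def chunk_words_py (text : String) (limit : Int) : List String :=
  let st := (PySem.Str.split₀ text).foldl (pvStepA limit) ([], [], 0)
  if st.2.1 = [] then st.1 else st.1 ++ [PySem.Str.join " " st.2.1]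

-- ===== PORT B =====
-- inner while loop: starting from running length n, take the maximal prefix of the
-- remaining words that still fits; returns (taken words, remaining words)
def pvTake (limit : Int) : Int → List String → List String × List String
  | _, [] => ([], [])
  | n, w :: rest =>
      if n + 1 + PySem.Str.len w ≤ limit then
        let p := pvTake limit (n + 1 + PySem.Str.len w) rest
        (w :: p.1, p.2)
      else ([], w :: rest)

theorem pvTake_rem_le (limit : Int) (n : Int) (ws : List String) :
    (pvTake limit n ws).2.length ≤ ws.length := by
  induction ws generalizing n with
  | nil => simp [pvTake]
  | cons w rest ih =>
    simp only [pvTake]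
    split
    · exact le_trans (ih _) (Nat.le_succ _)
    · simp

-- outer while loop: one chunk per iteration, recursing on the remaining words
def pvPack (limit : Int) : List String → List String
  | [] => []
  | w :: rest =>
      let p := pvTake limit (PySem.Str.len w) rest
      let chunk := PySem.Str.join " " (w :: p.1)
      (if PySem.Str.len chunk > limit then pvHardSplit chunk limit else [chunk]) ++
        pvPack limit p.2
termination_by ws => ws.length
decreasing_by
  exact Nat.lt_succ_of_le (pvTake_rem_le limit (PySem.Str.len w) rest)

def chunk_words_py_alt (text : String) (limit : Int) : List String :=
  pvPack limit (PySem.Str.split₀ text)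

-- ===== PRECONDITION & SPEC =====
-- Pre_ excludes exactly the inputs where Python A raises: with limit = 0 and at least
-- one word, _hard_split's range(0, n, 0) raises ValueError (B raises there too).
def Pre_chunk_words_py (text : String) (limit : Int) : Prop :=
  limit ≠ 0 ∨ PySem.Str.split₀ text = []
instance (text : String) (limit : Int) : Decidable (Pre_chunk_words_py text limit) := by
  unfold Pre_chunk_words_py; infer_instance

def pvWitness_chunk_words_py : String × Int := ("hello world foo", 5)

def Spec_chunk_words_py (text : String) (limit : Int) (out : List String) : Prop := out = chunk_words_py_alt text limit
instance (text : String) (limit : Int) (out : List String) : Decidable (Spec_chunk_words_py text limit out) := by unfold Spec_chunk_words_py; infer_instance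

-- ===== CLAIM (what is proved, stated in full; the proofs are below) =====
def Claim_equal_chunk_words_py : Prop := ∀ (text : String) (limit : Int), Dom_chunk_words_py text limit → Pre_chunk_words_py text limit → Spec_chunk_words_py text limit (chunk_words_py text limit)

-- ===== LEMMAS AND PROOFS =====

-- A's final flush, as a function of the loop state
def pvFinishA (st : List String × List String × Int) : List String :=
  if st.2.1 = [] then st.1 else st.1 ++ [PySem.Str.join " " st.2.1]

theorem pvLen_nonneg (w : String) : 0 ≤ PySem.Str.len w := by
  rw [PySem.Str.len_eq]; positivity

theorem pvJoin_singleton (w : String) : PySem.Str.join " " [w] = w := by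
  apply String.toList_inj.mp
  simp [PySem.Str.toList_join, PySem.Chars.join_singleton]

theorem pvJoin_append_last (sep : List Char) (ps : List (List Char)) (q : List Char)
    (h : ps ≠ []) :
    PySem.Chars.join sep (ps ++ [q]) = PySem.Chars.join sep ps ++ sep ++ q := by
  induction ps with
  | nil => exact absurd rfl h
  | cons p rest ih =>
    cases rest with
    | nil => simp [PySem.Chars.join_cons_cons, PySem.Chars.join_singleton]
    | cons r rs =>
      have ihh := ih (by simp)
      simp only [List.cons_append, PySem.Chars.join_cons_cons] at ihh ⊢
      rw [ihh]
      simp [List.append_assoc]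

theorem pvJlen_append (parts : List String) (w : String) (h : parts ≠ []) :
    PySem.Str.len (PySem.Str.join " " (parts ++ [w])) =
      PySem.Str.len (PySem.Str.join " " parts) + 1 + PySem.Str.len w := by
  have hmap : parts.map String.toList ≠ [] := by simpa using h
  simp only [PySem.Str.len_eq, PySem.Str.toList_join, List.map_append, List.map_cons,
    List.map_nil]
  rw [pvJoin_append_last _ _ _ hmap]
  simp [List.length_append]
  ring

-- A's step from a fresh running chunk, in closed form
theorem pvStepA_fresh (limit : Int) (chunks : List String) (w : String) :
    pvStepA limit (chunks, [], 0) w =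
      if PySem.Str.len w > limit then (chunks ++ pvHardSplit w limit, [], 0)
      else (chunks, [w], PySem.Str.len w) := by
  have h0 : pvStepA limit (chunks, [], 0) w =
      if 0 + (PySem.Str.len w + 0) > limit then
        (if PySem.Str.len w > limit then (chunks ++ pvHardSplit w limit, [], 0)
         else (chunks, [w], PySem.Str.len w))
      else (chunks, [] ++ [w], 0 + (PySem.Str.len w + 0)) := rfl
  rw [h0]
  by_cases hw : PySem.Str.len w > limit
  · rw [if_pos (by omega), if_pos hw]
  · rw [if_neg (by omega), if_neg hw]
    simp

-- A's step from a non-empty running chunk, in closed form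
theorem pvStepA_cons (limit : Int) (chunks parts : List String) (n : Int) (w : String)
    (hp : parts ≠ []) :
    pvStepA limit (chunks, parts, n) w =
      if n + (PySem.Str.len w + 1) > limit then
        (if PySem.Str.len w > limit then
           ((chunks ++ [PySem.Str.join " " parts]) ++ pvHardSplit w limit, [], 0)
         else (chunks ++ [PySem.Str.join " " parts], [w], PySem.Str.len w))
      else (chunks, parts ++ [w], n + (PySem.Str.len w + 1)) := by
  cases parts with
  | nil => exact absurd rfl hp
  | cons p ps => rfl

-- the joined length of the chunk produced by pvTake stays within limit
theorem pvTake_len_le (limit : Int) (rest : List String) :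
    ∀ (parts : List String) (n : Int), parts ≠ [] →
      n = PySem.Str.len (PySem.Str.join " " parts) → n ≤ limit →
      PySem.Str.len (PySem.Str.join " " (parts ++ (pvTake limit n rest).1)) ≤ limit := by
  induction rest with
  | nil =>
    intro parts n hp hn hle
    simp only [pvTake]
    rw [List.append_nil, ← hn]
    exact hle
  | cons r rest ih =>
    intro parts n hp hn hle
    simp only [pvTake]
    split
    · rename_i hfit
      have := ih (parts ++ [r]) (n + 1 + PySem.Str.len r) (by simp)
        (by rw [pvJlen_append parts r hp, ← hn]) hfit
      simpa [List.append_assoc] using this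
    · simp only
      rw [List.append_nil, ← hn]
      exact hle

-- after a flush, A's step on the next word equals A's step from a fresh state
theorem pvStepA_flush (limit : Int) (chunks parts : List String) (n : Int) (r : String)
    (hp : parts ≠ []) (hov : n + (PySem.Str.len r + 1) > limit) :
    pvStepA limit (chunks, parts, n) r =
      pvStepA limit (chunks ++ [PySem.Str.join " " parts], [], 0) r := by
  rw [pvStepA_cons limit chunks parts n r hp, pvStepA_fresh, if_pos hov]

-- the inner while loop, seen from A's side: folding A's step from a non-empty running
-- chunk first absorbs exactly pvTake's words, then continues from a fresh state
theorem pvFoldA_take (limit : Int) (rest : List String) :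
    ∀ (chunks parts : List String) (n : Int), parts ≠ [] →
      n = PySem.Str.len (PySem.Str.join " " parts) → n ≤ limit →
      pvFinishA (rest.foldl (pvStepA limit) (chunks, parts, n)) =
        pvFinishA ((pvTake limit n rest).2.foldl (pvStepA limit)
          (chunks ++ [PySem.Str.join " " (parts ++ (pvTake limit n rest).1)], [], 0)) := by
  induction rest with
  | nil =>
    intro chunks parts n hp hn hle
    simp [pvTake, pvFinishA, if_neg hp]
  | cons r rest ih =>
    intro chunks parts n hp hn hle
    have harr : n + 1 + PySem.Str.len r = n + (PySem.Str.len r + 1) := by ring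
    simp only [pvTake, List.foldl_cons, harr]
    split
    · rename_i hfit
      rw [pvStepA_cons limit chunks parts n r hp, if_neg (by omega)]
      have := ih chunks (parts ++ [r]) (n + (PySem.Str.len r + 1)) (by simp)
        (by rw [pvJlen_append parts r hp, ← hn]; ring) (by omega)
      simpa [List.append_assoc] using this
    · rename_i hfit
      rw [pvStepA_flush limit chunks parts n r hp (by omega)]
      simp

-- the outer loop: A's whole fold from a fresh state computes pvPack
theorem pvFoldA_pack (limit : Int) (m : ℕ) :
    ∀ (ws : List String), ws.length ≤ m → ∀ (chunks : List String),
      pvFinishA (ws.foldl (pvStepA limit) (chunks, [], 0)) = chunks ++ pvPack limit ws := by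
  induction m with
  | zero =>
    intro ws hlen chunks
    have : ws = [] := List.eq_nil_of_length_eq_zero (Nat.le_zero.mp hlen)
    simp [this, pvFinishA, pvPack]
  | succ m ih =>
    intro ws hlen chunks
    cases ws with
    | nil => simp [pvFinishA, pvPack]
    | cons w rest =>
      have hrest : rest.length ≤ m := by
        simp only [List.length_cons] at hlen; omega
      simp only [List.foldl_cons]
      rw [pvStepA_fresh]
      by_cases hw : PySem.Str.len w > limit
      · rw [if_pos hw, ih rest hrest]
        have htake : pvTake limit (PySem.Str.len w) rest = ([], rest) := by
          cases rest with
          | nil => simp [pvTake]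
          | cons r rs =>
            have := pvLen_nonneg r
            simp only [pvTake]
            rw [if_neg (by omega)]
        rw [pvPack]
        simp only [htake, pvJoin_singleton]
        rw [if_pos hw]
        simp [List.append_assoc]
      · rw [if_neg hw]
        have hjw : PySem.Str.len w = PySem.Str.len (PySem.Str.join " " [w]) := by
          rw [pvJoin_singleton]
        rw [pvFoldA_take limit rest chunks [w] (PySem.Str.len w) (by simp) hjw (by omega)]
        set p := pvTake limit (PySem.Str.len w) rest with hpdef
        have hrem : p.2.length ≤ m := by
          have h1 := pvTake_rem_le limit (PySem.Str.len w) rest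
          rw [← hpdef] at h1
          exact le_trans h1 hrest
        rw [ih p.2 hrem]
        have hchunkle : PySem.Str.len (PySem.Str.join " " ([w] ++ p.1)) ≤ limit :=
          pvTake_len_le limit rest [w] (PySem.Str.len w) (by simp) hjw (by omega)
        simp only [List.singleton_append] at hchunkle
        rw [pvPack]
        simp only [← hpdef]
        rw [if_neg (by omega)]
        simp [List.append_assoc]

-- ===== VERDICT (by name: the statement is the Claim_ definition above) =====
theorem chunk_words_py_spec : Claim_equal_chunk_words_py := by
  intro text limit _ _
  unfold Spec_chunk_words_py chunk_words_py chunk_words_py_alt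
  have h := pvFoldA_pack limit (PySem.Str.split₀ text).length (PySem.Str.split₀ text)
    (Nat.le_refl _) []
  simpa [pvFinishA] using h
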